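-- pv_equiv track=rewrite | github.com/IKNOWINOT/Murphy-System | src/concept_translation.py | _build_system_model
-- ===== SOURCE A (Python) =====
-- from typing import Any, Dict, List, Optional
--
-- def _build_system_model(
--     concepts: List[Dict[str, str]],
--     mappings: List[Dict[str, str]],
--     frameworks: List[str],
-- ) -> Dict[str, Any]:
--     """Synthesise a preliminary system model from extracted artefacts.
--
--     Returns a dict with ``components``, ``data_flows``,
--     ``control_logic``, and ``validation_methods``.
--     """
--     components: List[str] = []
--     data_flows: List[str] = []
--     control_logic: List[str] = []
--     validation_methods: List[str] = []
--
--     seen_components: set[str] = set()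
--
--     # Derive components from mappings
--     for mapping in mappings:
--         mod = mapping.get("murphy_module", "")
--         if mod and mod not in seen_components:
--             components.append(mod)
--             seen_components.add(mod)
--
--     # Derive components and flows from concepts
--     for concept in concepts:
--         actor = concept.get("actor", "")
--         action = concept.get("action", "")
--         goal = concept.get("goal", "")
--         constraint = concept.get("constraint", "")
--
--         if actor and actor not in seen_components:
--             components.append(actor)
--             seen_components.add(actor)
--
--         if actor and goal:
--             flow = f"{actor} \u2192 {goal}"
--             if flow not in data_flows:
--                 data_flows.append(flow)
--
--         if constraint:
--             rule = f"If {action}: {constraint}" if action else f"Constraint: {constraint}"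
--             if rule not in control_logic:
--                 control_logic.append(rule)
--
--     # Add regulatory-derived control logic
--     for fw in frameworks:
--         rule = f"Enforce {fw} compliance"
--         if rule not in control_logic:
--             control_logic.append(rule)
--
--     # Derive validation methods from concepts
--     for concept in concepts:
--         action = concept.get("action", "")
--         if action in {"validate", "verify", "check", "test", "audit", "inspect", "review"}:
--             method = f"{action} {concept.get('goal', 'system')}".strip()
--             if method not in validation_methods:
--                 validation_methods.append(method)
--
--     # If no explicit validation found, add defaults based on frameworks
--     if not validation_methods and frameworks:
--         for fw in frameworks:
--             validation_methods.append(f"{fw} compliance validation")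
--
--     return {
--         "components": components,
--         "data_flows": data_flows,
--         "control_logic": control_logic,
--         "validation_methods": validation_methods,
--     }
-- ===== SOURCE B (Python) =====
-- _VALIDATION_ACTIONS = {"validate", "verify", "check", "test", "audit", "inspect", "review"}
--
--
-- def _distinct(items):
--     """Sieve-style first-occurrence dedup: repeatedly take the head and
--     filter every later duplicate of it out of the remainder (no seen-set,
--     no membership test against the output)."""
--     out = []
--     rest = list(items)
--     while rest:
--         head = rest[0]
--         out.append(head)
--         rest = [x for x in rest if x != head]
--     return out
--
--
-- def _build_system_model(concepts, mappings, frameworks):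
--     """Single merged pass over concepts collecting four raw candidate lists
--     (with duplicates), then sieve-dedup each output."""
--     actors, flows, rules, methods = [], [], [], []
--     for c in concepts:
--         actor = c.get("actor", "")
--         action = c.get("action", "")
--         goal = c.get("goal", "")
--         constraint = c.get("constraint", "")
--         if actor:
--             actors.append(actor)
--         if actor and goal:
--             flows.append(f"{actor} \u2192 {goal}")
--         if constraint:
--             rules.append(f"If {action}: {constraint}" if action else f"Constraint: {constraint}")
--         if action in _VALIDATION_ACTIONS:
--             methods.append(f"{action} {c.get('goal', 'system')}".strip())
--
--     modules = []
--     for m in mappings: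
--         mod = m.get("murphy_module", "")
--         if mod:
--             modules.append(mod)
--
--     for fw in frameworks:
--         rules.append(f"Enforce {fw} compliance")
--
--     validation_methods = _distinct(methods)
--     if not validation_methods and frameworks:
--         validation_methods = [f"{fw} compliance validation" for fw in frameworks]
--
--     return {
--         "components": _distinct(modules + actors),
--         "data_flows": _distinct(flows),
--         "control_logic": _distinct(rules),
--         "validation_methods": validation_methods,
--     }
-- ===== Notes on version B (the rewrite author's own statement) =====
-- stated objective: alternative
-- what changed: A's two separate concept loops with a shared seen-set and inline 'not in' append guards are replaced by one merged pass collecting raw candidate lists with duplicates, deduplicated afterwards by a sieve that repeatedly takes the head and filters its later duplicates out of the remainder (no seen-set and no membership test against the output).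
import Mathlib
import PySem

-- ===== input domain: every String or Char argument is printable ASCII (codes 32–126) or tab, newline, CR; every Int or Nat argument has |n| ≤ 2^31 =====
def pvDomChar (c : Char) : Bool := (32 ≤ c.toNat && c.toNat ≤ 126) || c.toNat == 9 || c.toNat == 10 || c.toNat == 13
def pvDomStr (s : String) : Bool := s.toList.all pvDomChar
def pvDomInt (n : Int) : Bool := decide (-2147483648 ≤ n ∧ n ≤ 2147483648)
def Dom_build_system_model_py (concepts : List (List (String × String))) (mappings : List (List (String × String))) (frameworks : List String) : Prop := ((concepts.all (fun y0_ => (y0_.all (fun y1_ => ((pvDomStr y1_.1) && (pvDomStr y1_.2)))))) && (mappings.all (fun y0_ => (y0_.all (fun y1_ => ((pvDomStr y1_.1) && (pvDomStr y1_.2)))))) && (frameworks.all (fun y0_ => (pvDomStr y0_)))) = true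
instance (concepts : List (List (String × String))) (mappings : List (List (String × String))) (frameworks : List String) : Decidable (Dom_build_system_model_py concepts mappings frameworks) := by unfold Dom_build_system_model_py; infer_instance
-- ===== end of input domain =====

-- B merges A's two concept loops into one pass collecting raw candidate lists with
-- duplicates and dedups each output afterwards with a sieve that repeatedly takes
-- the head and filters its later duplicates out of the remainder (alternative).

-- dict.get(k, dflt) on an association list (first match wins)
def pvGet (m : List (String × String)) (k dflt : String) : String :=
  (PySem.Dict.mk m).getD k dflt

-- ===== PORT A =====
-- body of A's `for mapping in mappings` loop
def pvCompStep (st : List String × PySem.Set String) (mapping : List (String × String)) :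
    List String × PySem.Set String :=
  let mod := pvGet mapping "murphy_module" ""
  if mod ≠ "" ∧ ¬ PySem.Set.contains st.2 mod then
    (st.1 ++ [mod], PySem.Set.add st.2 mod)
  else st

-- body of A's first `for concept in concepts` loop
def pvConceptStep (st : (List String × PySem.Set String) × List String × List String)
    (concept : List (String × String)) :
    (List String × PySem.Set String) × List String × List String :=
  let actor := pvGet concept "actor" ""
  let action := pvGet concept "action" ""
  let goal := pvGet concept "goal" ""
  let constraint := pvGet concept "constraint" ""
  let comps :=
    if actor ≠ "" ∧ ¬ PySem.Set.contains st.1.2 actor then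
      (st.1.1 ++ [actor], PySem.Set.add st.1.2 actor)
    else st.1
  let flows :=
    if actor ≠ "" ∧ goal ≠ "" then
      let flow := actor ++ " → " ++ goal
      if flow ∈ st.2.1 then st.2.1 else st.2.1 ++ [flow]
    else st.2.1
  let rules :=
    if constraint ≠ "" then
      let rule := if action ≠ "" then "If " ++ action ++ ": " ++ constraint
                  else "Constraint: " ++ constraint
      if rule ∈ st.2.2 then st.2.2 else st.2.2 ++ [rule]
    else st.2.2
  (comps, flows, rules)

-- body of A's `for fw in frameworks` loop
def pvFwStep (rules : List String) (fw : String) : List String :=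
  let rule := "Enforce " ++ fw ++ " compliance"
  if rule ∈ rules then rules else rules ++ [rule]

-- body of A's second `for concept in concepts` loop
def pvValStep (vs : List String) (concept : List (String × String)) : List String :=
  let action := pvGet concept "action" ""
  if action ∈ ["validate", "verify", "check", "test", "audit", "inspect", "review"] then
    let method := PySem.Str.strip (action ++ " " ++ pvGet concept "goal" "system")
    if method ∈ vs then vs else vs ++ [method]
  else vs

def build_system_model_py (concepts : List (List (String × String))) (mappings : List (List (String × String))) (frameworks : List String) : List (String × List String) :=
  let st1 := mappings.foldl pvCompStep ([], PySem.Set.empty)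
  let st2 := concepts.foldl pvConceptStep (st1, [], [])
  let control_logic := frameworks.foldl pvFwStep st2.2.2
  let validation := concepts.foldl pvValStep []
  let validation :=
    if validation = [] ∧ frameworks ≠ [] then
      frameworks.foldl (fun vs fw => vs ++ [fw ++ " compliance validation"]) validation
    else validation
  [("components", st2.1.1), ("data_flows", st2.2.1),
   ("control_logic", control_logic), ("validation_methods", validation)]

-- ===== PORT B =====
-- B's `_distinct`: take the head, filter its later duplicates out of the remainder
def pvDistinct : List String → List String
  | [] => []
  | h :: t => h :: pvDistinct (t.filter (fun x => x ≠ h))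
termination_by l => l.length
decreasing_by
  simpa using Nat.lt_succ_of_le (le_trans (List.length_filter_le _ t.attach) (by simp))

-- body of B's `for m in mappings` modules loop
def pvModStep (acc : List String) (m : List (String × String)) : List String :=
  let mod := pvGet m "murphy_module" ""
  if mod ≠ "" then acc ++ [mod] else acc

-- body of B's single merged `for c in concepts` pass
def pvScanStep (st : List String × List String × List String × List String)
    (c : List (String × String)) : List String × List String × List String × List String :=
  let actor := pvGet c "actor" ""
  let action := pvGet c "action" ""
  let goal := pvGet c "goal" ""
  let constraint := pvGet c "constraint" ""
  (if actor ≠ "" then st.1 ++ [actor] else st.1,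
   if actor ≠ "" ∧ goal ≠ "" then st.2.1 ++ [actor ++ " → " ++ goal] else st.2.1,
   if constraint ≠ "" then
     st.2.2.1 ++ [if action ≠ "" then "If " ++ action ++ ": " ++ constraint
                  else "Constraint: " ++ constraint]
   else st.2.2.1,
   if action ∈ ["validate", "verify", "check", "test", "audit", "inspect", "review"] then
     st.2.2.2 ++ [PySem.Str.strip (action ++ " " ++ pvGet c "goal" "system")]
   else st.2.2.2)

def build_system_model_py_alt (concepts : List (List (String × String))) (mappings : List (List (String × String))) (frameworks : List String) : List (String × List String) :=
  let s := concepts.foldl pvScanStep ([], [], [], [])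
  let modules := mappings.foldl pvModStep []
  let rules := frameworks.foldl
    (fun acc fw => acc ++ ["Enforce " ++ fw ++ " compliance"]) s.2.2.1
  let validation_methods := pvDistinct s.2.2.2
  let validation_methods :=
    if validation_methods = [] ∧ frameworks ≠ [] then
      frameworks.map (fun fw => fw ++ " compliance validation")
    else validation_methods
  [("components", pvDistinct (modules ++ s.1)), ("data_flows", pvDistinct s.2.1),
   ("control_logic", pvDistinct rules), ("validation_methods", validation_methods)]

-- ===== PRECONDITION & SPEC =====
def Spec_build_system_model_py (concepts : List (List (String × String))) (mappings : List (List (String × String))) (frameworks : List String) (out : List (String × List String)) : Prop := out = build_system_model_py_alt concepts mappings frameworks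
instance (concepts : List (List (String × String))) (mappings : List (List (String × String))) (frameworks : List String) (out : List (String × List String)) : Decidable (Spec_build_system_model_py concepts mappings frameworks out) := by unfold Spec_build_system_model_py; infer_instance

-- ===== CLAIM (what is proved, stated in full; the proofs are below) =====
def Claim_equal_build_system_model_py : Prop := ∀ (concepts : List (List (String × String))) (mappings : List (List (String × String))) (frameworks : List String), Dom_build_system_model_py concepts mappings frameworks → Spec_build_system_model_py concepts mappings frameworks (build_system_model_py concepts mappings frameworks)

-- ===== LEMMAS AND PROOFS =====

-- one step of A's mapping loop, on a state whose components list equals its seen set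
theorem pvCompStep_pair (s : List String) (m : List (String × String)) :
    pvCompStep (s, s) m =
      (if pvGet m "murphy_module" "" = "" then s else PySem.Set.add s (pvGet m "murphy_module" ""),
       if pvGet m "murphy_module" "" = "" then s else PySem.Set.add s (pvGet m "murphy_module" "")) := by
  by_cases hm : pvGet m "murphy_module" "" = "" <;>
    by_cases hmem : pvGet m "murphy_module" "" ∈ s <;>
      simp [pvCompStep, PySem.Set.add, PySem.Set.contains, hm, hmem]

theorem mapping_loop :
    ∀ (ms : List (List (String × String))) (s : List String),
      ms.foldl pvCompStep (s, s) =
        (((ms.map (fun m => pvGet m "murphy_module" "")).filter (fun x => x ≠ "")).foldl PySem.Set.add s,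
         ((ms.map (fun m => pvGet m "murphy_module" "")).filter (fun x => x ≠ "")).foldl PySem.Set.add s) := by
  intro ms
  induction ms with
  | nil => intro s; rfl
  | cons m rest ih =>
    intro s
    rw [List.foldl_cons, pvCompStep_pair]
    by_cases hm : pvGet m "murphy_module" "" = "" <;>
      simp [hm, ih]

-- one step of A's concept loop, on a state whose components list equals its seen set
theorem pvConceptStep_pair (s fl ru : List String) (c : List (String × String)) :
    pvConceptStep ((s, s), fl, ru) c =
      ((if pvGet c "actor" "" = "" then s else PySem.Set.add s (pvGet c "actor" ""),
        if pvGet c "actor" "" = "" then s else PySem.Set.add s (pvGet c "actor" "")),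
       (if pvGet c "actor" "" ≠ "" ∧ pvGet c "goal" "" ≠ "" then
          PySem.Set.add fl (pvGet c "actor" "" ++ " → " ++ pvGet c "goal" "")
        else fl),
       (if pvGet c "constraint" "" ≠ "" then
          PySem.Set.add ru (if pvGet c "action" "" ≠ "" then
              "If " ++ pvGet c "action" "" ++ ": " ++ pvGet c "constraint" ""
            else "Constraint: " ++ pvGet c "constraint" "")
        else ru)) := by
  by_cases ha : pvGet c "actor" "" = "" <;>
    by_cases hmem : pvGet c "actor" "" ∈ s <;>
      simp [pvConceptStep, PySem.Set.add, PySem.Set.contains, ha, hmem]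

theorem concept_loop :
    ∀ (cs : List (List (String × String))) (s fl ru : List String),
      cs.foldl pvConceptStep ((s, s), fl, ru) =
        ((((cs.map (fun c => pvGet c "actor" "")).filter (fun x => x ≠ "")).foldl PySem.Set.add s,
          ((cs.map (fun c => pvGet c "actor" "")).filter (fun x => x ≠ "")).foldl PySem.Set.add s),
         (((cs.filter (fun c => pvGet c "actor" "" ≠ "" ∧ pvGet c "goal" "" ≠ "")).map
            (fun c => pvGet c "actor" "" ++ " → " ++ pvGet c "goal" "")).foldl PySem.Set.add fl),
         (((cs.filter (fun c => pvGet c "constraint" "" ≠ "")).map (fun c =>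
            if pvGet c "action" "" ≠ "" then
              "If " ++ pvGet c "action" "" ++ ": " ++ pvGet c "constraint" ""
            else "Constraint: " ++ pvGet c "constraint" "")).foldl PySem.Set.add ru)) := by
  intro cs
  induction cs with
  | nil => intro s fl ru; rfl
  | cons c rest ih =>
    intro s fl ru
    rw [List.foldl_cons, pvConceptStep_pair, ih]
    by_cases ha : pvGet c "actor" "" = "" <;>
      by_cases hg : pvGet c "goal" "" = "" <;>
        by_cases hc : pvGet c "constraint" "" = "" <;>
          simp [ha, hg, hc]

-- A's framework loop is a Set.add fold over the formatted rules
theorem fw_loop :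
    ∀ (fws : List String) (acc : List String),
      fws.foldl pvFwStep acc =
        (fws.map (fun fw => "Enforce " ++ fw ++ " compliance")).foldl PySem.Set.add acc := by
  intro fws
  induction fws with
  | nil => intro acc; rfl
  | cons fw rest ih =>
    intro acc
    simp [List.foldl_cons, pvFwStep, PySem.Set.add, PySem.Set.contains, ih]

-- A's validation loop is a Set.add fold over the filtered, formatted methods
theorem val_loop :
    ∀ (cs : List (List (String × String))) (acc : List String),
      cs.foldl pvValStep acc =
        List.foldl PySem.Set.add acc
          ((cs.filter (fun c =>
            pvGet c "action" "" ∈ ["validate", "verify", "check", "test", "audit", "inspect", "review"])).map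
          (fun c => PySem.Str.strip (pvGet c "action" "" ++ " " ++ pvGet c "goal" "system"))) := by
  intro cs
  induction cs with
  | nil => intro acc; rfl
  | cons c rest ih =>
    intro acc
    by_cases hac : pvGet c "action" "" ∈ ["validate", "verify", "check", "test", "audit", "inspect", "review"] <;>
      [skip; skip] <;> first
      | (have hac' := hac; simp only [List.mem_cons, List.not_mem_nil, or_false] at hac';
         simp [List.foldl_cons, pvValStep, PySem.Set.add, PySem.Set.contains, hac, hac', ih])

-- A's default-validation loop just appends the formatted frameworks
theorem default_loop :
    ∀ (fws : List String) (acc : List String),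
      fws.foldl (fun vs fw => vs ++ [fw ++ " compliance validation"]) acc =
        acc ++ fws.map (fun fw => fw ++ " compliance validation") := by
  intro fws
  induction fws with
  | nil => intro acc; simp
  | cons fw rest ih => intro acc; simp [List.foldl_cons, ih]

-- B's merged scan pass computes the same four raw candidate lists, appended to the state
theorem scan_loop :
    ∀ (cs : List (List (String × String))) (a f r m : List String),
      cs.foldl pvScanStep (a, f, r, m) =
        (a ++ (cs.map (fun c => pvGet c "actor" "")).filter (fun x => x ≠ ""),
         f ++ (cs.filter (fun c => pvGet c "actor" "" ≠ "" ∧ pvGet c "goal" "" ≠ "")).map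
            (fun c => pvGet c "actor" "" ++ " → " ++ pvGet c "goal" ""),
         r ++ (cs.filter (fun c => pvGet c "constraint" "" ≠ "")).map (fun c =>
            if pvGet c "action" "" ≠ "" then
              "If " ++ pvGet c "action" "" ++ ": " ++ pvGet c "constraint" ""
            else "Constraint: " ++ pvGet c "constraint" ""),
         m ++ (cs.filter (fun c =>
            pvGet c "action" "" ∈ ["validate", "verify", "check", "test", "audit", "inspect", "review"])).map
            (fun c => PySem.Str.strip (pvGet c "action" "" ++ " " ++ pvGet c "goal" "system"))) := by
  intro cs
  induction cs with
  | nil => intro a f r m; simp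
  | cons c rest ih =>
    intro a f r m
    rw [List.foldl_cons]
    by_cases ha : pvGet c "actor" "" = "" <;>
      by_cases hg : pvGet c "goal" "" = "" <;>
        by_cases hc : pvGet c "constraint" "" = "" <;>
          by_cases hac : pvGet c "action" "" ∈ ["validate", "verify", "check", "test", "audit", "inspect", "review"] <;>
            (have hac' := hac; simp only [List.mem_cons, List.not_mem_nil, or_false] at hac';
             simp [pvScanStep, ha, hg, hc, hac, hac', ih])

-- B's modules loop is the filtered map of murphy_module values, appended to the accumulator
theorem modules_loop :
    ∀ (ms : List (List (String × String))) (acc : List String),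
      ms.foldl pvModStep acc =
        acc ++ ((ms.map (fun m => pvGet m "murphy_module" "")).filter (fun x => x ≠ "")) := by
  intro ms
  induction ms with
  | nil => intro acc; simp
  | cons m rest ih =>
    intro acc
    by_cases hm : pvGet m "murphy_module" "" = "" <;> simp [pvModStep, hm, ih]

-- B's rules loop appends the formatted framework rules
theorem rules_loop :
    ∀ (fws : List String) (acc : List String),
      fws.foldl (fun acc fw => acc ++ ["Enforce " ++ fw ++ " compliance"]) acc =
        acc ++ fws.map (fun fw => "Enforce " ++ fw ++ " compliance") := by
  intro fws
  induction fws with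
  | nil => intro acc; simp
  | cons fw rest ih => intro acc; simp [ih]

theorem pvDistinct_nil : pvDistinct [] = [] := by
  rw [pvDistinct.eq_def]

theorem pvDistinct_cons (h : String) (t : List String) :
    pvDistinct (h :: t) = h :: pvDistinct (t.filter (fun x => x ≠ h)) := by
  rw [pvDistinct.eq_def]

-- the sieve dedup equals the Set.add fold (accumulator generalised)
theorem foldl_add_eq_distinct :
    ∀ (xs acc : List String),
      xs.foldl PySem.Set.add acc = acc ++ pvDistinct (xs.filter (fun x => x ∉ acc)) := by
  intro xs
  induction xs with
  | nil => intro acc; simp [pvDistinct_nil]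
  | cons x t ih =>
    intro acc
    by_cases hx : x ∈ acc
    · simp [PySem.Set.add, PySem.Set.contains, hx, ih]
    · have hfil : t.filter (fun y => y ∉ acc ++ [x]) =
          (t.filter (fun y => y ∉ acc)).filter (fun y => y ≠ x) := by
        rw [List.filter_filter]
        apply List.filter_congr
        intro y _
        by_cases h1 : y ∈ acc <;> by_cases h2 : y = x <;> simp [h1, h2]
      have hadd : PySem.Set.add acc x = acc ++ [x] := by
        simp [PySem.Set.add, PySem.Set.contains, hx]
      have hflt : (x :: t).filter (fun y => y ∉ acc) =
          x :: t.filter (fun y => y ∉ acc) := by simp [hx]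
      rw [List.foldl_cons, hadd, ih (acc ++ [x]), hfil, hflt, pvDistinct_cons]
      simp

theorem distinct_eq_foldl_add (xs : List String) :
    pvDistinct xs = xs.foldl PySem.Set.add [] := by
  rw [foldl_add_eq_distinct]
  simp

-- ===== VERDICT (by name: the statement is the Claim_ definition above) =====
theorem build_system_model_py_spec : Claim_equal_build_system_model_py := by
  intro concepts mappings frameworks _
  unfold Spec_build_system_model_py
  simp only [build_system_model_py, build_system_model_py_alt, PySem.Set.empty]
  rw [mapping_loop mappings [], concept_loop, fw_loop, val_loop, scan_loop, modules_loop, rules_loop]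
  simp only [distinct_eq_foldl_add, List.nil_append, List.foldl_append, default_loop]
  split_ifs <;> simp_all
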